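-- pv_equiv track=rewrite | github.com/drizztSun/common_project | PythonLeetcode/leetcodeM/216_CombinationSumIII.py | doit_backtracking
-- ===== SOURCE A (Python) =====
-- def doit_backtracking(k: int, n: int) -> list:
--
--     def backtracking(i, d, path, target):
--         if i == k:
--             if target == 0:
--                 res.append(path[:])
--             return
--
--         for j in range(d, 10):
--             if target < j: break
--
--             path.append(j)
--             backtracking(i+1, j+1, path, target - j)
--             path.pop()
--
--     res = []
--     backtracking(0, 1, [], n)
--     return res
-- ===== SOURCE B (Python) =====
-- def combos(m, xs):
--     # all m-element combinations of xs, in lexicographic order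
--     if m == 0:
--         return [[]]
--     if not xs:
--         return []
--     return [[xs[0]] + c for c in combos(m - 1, xs[1:])] + combos(m, xs[1:])
--
--
-- def doit_backtracking(k: int, n: int) -> list:
--     return [c for c in combos(k, list(range(1, 10))) if sum(c) == n]
-- ===== Notes on version B (the rewrite author's own statement) =====
-- stated objective: alternative
-- what changed: B replaces A's mutable-path pruned DFS (append/recurse/pop with a break when target < j) by exhaustive generation of all k-combinations of 1..9 in lexicographic order via a pure recursive combinator, followed by a sum filter.
import Mathlib
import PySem

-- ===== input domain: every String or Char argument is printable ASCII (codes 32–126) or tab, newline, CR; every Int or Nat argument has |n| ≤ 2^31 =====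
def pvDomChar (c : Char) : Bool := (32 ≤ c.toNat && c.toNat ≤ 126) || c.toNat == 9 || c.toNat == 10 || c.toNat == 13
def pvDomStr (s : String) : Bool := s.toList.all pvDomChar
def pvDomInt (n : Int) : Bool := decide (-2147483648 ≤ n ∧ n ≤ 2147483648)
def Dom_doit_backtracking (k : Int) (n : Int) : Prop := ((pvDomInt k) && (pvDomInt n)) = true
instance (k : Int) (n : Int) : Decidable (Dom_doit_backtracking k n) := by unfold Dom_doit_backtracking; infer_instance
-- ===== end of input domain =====

-- B replaces A's pruned in-place DFS by exhaustive lexicographic generation of all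
-- k-combinations of 1..9 plus a sum filter; same results, no speed claim.

-- ===== PORT A =====
-- A's inner `backtracking` appends to `res`; ported with `res` as an explicit accumulator.
-- The recursion depth is bounded by 10 (d strictly increases towards 10), so fuel 11 is exact.
mutual
def btA (fuel : Nat) (k i d : Int) (path : List Int) (target : Int) (res : List (List Int)) : List (List Int) :=
  match fuel with
  | 0 => res   -- never reached from the entry point (depth ≤ 10 < 11)
  | f + 1 =>
    if i = k then (if target = 0 then res ++ [path] else res)
    else loopA f k i (PySem.List.pyRange d 10 1) path target res
termination_by (fuel, 0)

def loopA (fuel : Nat) (k i : Int) (js : List Int) (path : List Int) (target : Int) (res : List (List Int)) : List (List Int) :=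
  match js with
  | [] => res
  | j :: rest =>
    if target < j then res   -- the `break`
    else loopA fuel k i rest path target (btA fuel k (i + 1) (j + 1) (path ++ [j]) (target - j) res)
termination_by (fuel, js.length + 1)
end

def doit_backtracking (k : Int) (n : Int) : List (List Int) :=
  btA 11 k 0 1 [] n []

-- ===== PORT B =====
def combosB (m : Int) (xs : List Int) : List (List Int) :=
  if m = 0 then [[]]
  else match xs with
    | [] => []
    | x :: rest => (combosB (m - 1) rest).map (fun c => x :: c) ++ combosB m rest
termination_by xs.length

def doit_backtracking_alt (k : Int) (n : Int) : List (List Int) :=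
  (combosB k (PySem.List.pyRange 1 10 1)).filter (fun c => c.sum == n)

-- ===== PRECONDITION & SPEC =====
def Spec_doit_backtracking (k : Int) (n : Int) (out : List (List Int)) : Prop := out = doit_backtracking_alt k n
instance (k : Int) (n : Int) (out : List (List Int)) : Decidable (Spec_doit_backtracking k n out) := by unfold Spec_doit_backtracking; infer_instance

-- ===== CLAIM (what is proved, stated in full; the proofs are below) =====
def Claim_equal_doit_backtracking : Prop := ∀ (k : Int) (n : Int), Dom_doit_backtracking k n → Spec_doit_backtracking k n (doit_backtracking k n)

-- ===== LEMMAS AND PROOFS =====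

lemma combosB_neg (m : Int) (xs : List Int) (h : m < 0) : combosB m xs = [] := by
  induction xs generalizing m with
  | nil => unfold combosB; simp [show ¬ m = 0 by omega]
  | cons x rest ih =>
    unfold combosB
    simp [show ¬ m = 0 by omega, ih (m - 1) (by omega), ih m h]

lemma mem_combosB (m : Int) (xs : List Int) (c : List Int) (hc : c ∈ combosB m xs) :
    (∀ x ∈ c, x ∈ xs) ∧ (c.length : Int) = m := by
  induction xs generalizing m c with
  | nil =>
    unfold combosB at hc
    by_cases h : m = 0 <;> simp [h] at hc
    simp [hc, h]
  | cons x rest ih =>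
    unfold combosB at hc
    by_cases h : m = 0
    · simp [h] at hc; simp [hc, h]
    · simp only [h, if_false, List.mem_append, List.mem_map] at hc
      rcases hc with ⟨c', hc', rfl⟩ | hc
      · obtain ⟨h1, h2⟩ := ih (m - 1) c' hc'
        constructor
        · intro y hy
          rcases List.mem_cons.mp hy with rfl | hy
          · exact List.mem_cons_self
          · exact List.mem_cons_of_mem _ (h1 y hy)
        · simp; omega
      · obtain ⟨h1, h2⟩ := ih m c hc
        exact ⟨fun y hy => List.mem_cons_of_mem _ (h1 y hy), h2⟩

-- pruning: a nonempty combination from digits ≥ d (with d ≥ 1) has sum ≥ d > target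
lemma filter_combosB_nil (m d target : Int) (hm : m ≠ 0) (hd : 1 ≤ d) (ht : target < d) :
    (combosB m (PySem.List.pyRange d 10 1)).filter (fun c => c.sum == target) = [] := by
  rw [List.filter_eq_nil_iff]
  intro c hc
  obtain ⟨h1, h2⟩ := mem_combosB m _ c hc
  have hlow : ∀ x ∈ c, d ≤ x := by
    intro x hx
    exact ((PySem.List.mem_pyRange_one).mp (h1 x hx)).1
  have hne : c ≠ [] := by
    intro h; subst h; simp at h2; omega
  obtain ⟨y, ys, rfl⟩ := List.exists_cons_of_ne_nil hne
  have hsum : 0 ≤ ys.sum := List.sum_nonneg (fun x hx => le_trans (by omega) (hlow x (List.mem_cons_of_mem _ hx)))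
  have hy : d ≤ y := hlow y List.mem_cons_self
  simp only [List.sum_cons, beq_iff_eq]
  omega

lemma btA_gt (fuel : Nat) (k i : Int) (h : k < i) :
    ∀ (d : Int) (path : List Int) (target : Int) (res : List (List Int)),
      btA fuel k i d path target res = res := by
  induction fuel generalizing i with
  | zero => intro d path target res; simp [btA]
  | succ f ih =>
    intro d path target res
    have hik : ¬ i = k := by omega
    unfold btA
    simp only [hik, if_false]
    have loopid : ∀ (js : List Int) (path : List Int) (target : Int) (res : List (List Int)),
        loopA f k i js path target res = res := by
      intro js
      induction js with
      | nil => intro path target res; simp [loopA]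
      | cons j rest ihl =>
        intro path target res
        unfold loopA
        by_cases hb : target < j
        · simp [hb]
        · simp only [hb, if_false]
          rw [ih (i + 1) (by omega), ihl]
    exact loopid _ _ _ _

lemma btA_spec (fuel : Nat) :
    ∀ (k i d : Int) (path : List Int) (target : Int) (res : List (List Int)),
      1 ≤ d → d ≤ 10 → i ≤ k → (11 - d).toNat ≤ fuel →
      btA fuel k i d path target res =
        res ++ ((combosB (k - i) (PySem.List.pyRange d 10 1)).filter
          (fun c => c.sum == target)).map (fun c => path ++ c) := by
  induction fuel with
  | zero => intro k i d path target res h1 h2 h3 h4; omega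
  | succ f ih =>
    intro k i d path target res h1 h2 h3 h4
    unfold btA
    by_cases hik : i = k
    · subst hik
      simp only [if_true]
      have : combosB (i - i) (PySem.List.pyRange d 10 1) = [[]] := by
        unfold combosB; simp
      rw [this]
      by_cases ht : target = 0
      · simp [ht]
      · simp [ht, Ne.symm ht]
    · -- i < k
      have hik' : i < k := lt_of_le_of_ne h3 hik
      simp only [hik, if_false]
      -- inner loop over the suffix ranges, by induction on the range length
      have loopspec : ∀ (e : Nat) (d' : Int), 1 ≤ d' → d' ≤ 10 → (10 - d').toNat ≤ f →
          (10 - d').toNat ≤ e →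
          ∀ (path : List Int) (target : Int) (res : List (List Int)),
          loopA f k i (PySem.List.pyRange d' 10 1) path target res =
            res ++ ((combosB (k - i) (PySem.List.pyRange d' 10 1)).filter
              (fun c => c.sum == target)).map (fun c => path ++ c) := by
        intro e
        induction e with
        | zero =>
          intro d' hd1 hd2 hf he path target res
          have : d' = 10 := by omega
          subst this
          rw [PySem.List.pyRange_one_eq_nil (by omega)]
          have : combosB (k - i) ([] : List Int) = [] := by
            unfold combosB; simp [show ¬ k - i = 0 by omega]
          simp [loopA, this]
        | succ e' ihe =>
          intro d' hd1 hd2 hf he path target res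
          by_cases hlt : d' < 10
          · rw [PySem.List.pyRange_one_cons (by omega)]
            unfold loopA
            by_cases hb : target < d'
            · have := filter_combosB_nil (k - i) d' target (by omega) hd1 hb
              rw [PySem.List.pyRange_one_cons (by omega)] at this
              simp [hb, this]
            · simp only [hb, if_false]
              rw [ih k (i + 1) (d' + 1) (path ++ [d']) (target - d') res
                    (by omega) (by omega) (by omega) (by omega)]
              rw [ihe (d' + 1) (by omega) (by omega) (by omega) (by omega)]
              have hcomb : combosB (k - i) (d' :: PySem.List.pyRange (d' + 1) 10 1) =
                  ((combosB (k - i - 1) (PySem.List.pyRange (d' + 1) 10 1)).map (fun c => d' :: c))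
                    ++ combosB (k - i) (PySem.List.pyRange (d' + 1) 10 1) := by
                conv_lhs => unfold combosB
                simp [show ¬ k - i = 0 by omega]
              have hki : k - (i + 1) = k - i - 1 := by omega
              rw [hki, List.append_assoc]
              congr 1
              rw [hcomb, List.filter_append, List.map_append]
              congr 1
              rw [List.filter_map, List.map_map]
              have hpred : (fun c => (c : List Int).sum == target) ∘ (fun c => d' :: c) =
                  fun c => (c : List Int).sum == target - d' := by
                funext c
                simp only [Function.comp_apply, List.sum_cons]
                by_cases h : c.sum = target - d' <;> simp [h] <;> omega
              rw [hpred]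
              congr 1
              funext c
              simp
          · have : d' = 10 := by omega
            subst this
            rw [PySem.List.pyRange_one_eq_nil (by omega)]
            have : combosB (k - i) ([] : List Int) = [] := by
              unfold combosB; simp [show ¬ k - i = 0 by omega]
            simp [loopA, this]
      exact loopspec (10 - d).toNat d h1 h2 (by omega) (le_refl _) path target res

-- ===== VERDICT (by name: the statement is the Claim_ definition above) =====
theorem doit_backtracking_spec : Claim_equal_doit_backtracking := by
  intro k n _
  unfold Spec_doit_backtracking doit_backtracking doit_backtracking_alt
  by_cases hk : 0 ≤ k
  · rw [btA_spec 11 k 0 1 [] n [] (by omega) (by omega) hk (by norm_num)]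
    simp
  · rw [btA_gt 11 k 0 (by omega), combosB_neg k _ (by omega)]
    rfl
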